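-- pv_equiv track=rewrite | github.com/epireve/hdm | legacy/enhance_visualization_data.py | assign_default_domains
-- ===== SOURCE A (Python) =====
-- from typing import Dict, List, Any
--
-- def assign_default_domains(node: Dict[str, Any]) -> List[str]:
--     """Assign default domains based on concept characteristics"""
--     concept_name = node['name'].lower()
--     category = node.get('category', '').lower()
--
--     # Domain assignment based on concept name patterns
--     if any(term in concept_name for term in ['learn', 'education', 'student', 'curriculum']):
--         return ['education', 'general']
--     elif any(term in concept_name for term in ['health', 'medical', 'clinical', 'patient']):
--         return ['healthcare', 'general']
--     elif any(term in concept_name for term in ['social', 'network', 'collaboration', 'community']):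
--         return ['social', 'general']
--     elif any(term in concept_name for term in ['iot', 'sensor', 'device', 'smart']):
--         return ['iot', 'general']
--     elif any(term in concept_name for term in ['enterprise', 'business', 'organization']):
--         return ['enterprise', 'general']
--     elif category in ['knowledge_graph', 'hdm_specific']:
--         return ['general', 'education', 'healthcare', 'enterprise']
--     elif category == 'algorithms':
--         return ['general', 'education', 'healthcare']
--     elif category == 'data_integration':
--         return ['enterprise', 'healthcare', 'general']
--     else:
--         return ['general']
-- ===== SOURCE B (Python) =====
-- # B: single flat pass over a keyword->(priority, domains) dict with a best-priority
-- # accumulator (min over all matching keywords), instead of A's ordered if/elif chain of any() checks.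
-- KEYWORD_DOMAINS = {
--     'learn': (0, ['education', 'general']),
--     'education': (0, ['education', 'general']),
--     'student': (0, ['education', 'general']),
--     'curriculum': (0, ['education', 'general']),
--     'health': (1, ['healthcare', 'general']),
--     'medical': (1, ['healthcare', 'general']),
--     'clinical': (1, ['healthcare', 'general']),
--     'patient': (1, ['healthcare', 'general']),
--     'social': (2, ['social', 'general']),
--     'network': (2, ['social', 'general']),
--     'collaboration': (2, ['social', 'general']),
--     'community': (2, ['social', 'general']),
--     'iot': (3, ['iot', 'general']),
--     'sensor': (3, ['iot', 'general']),
--     'device': (3, ['iot', 'general']),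
--     'smart': (3, ['iot', 'general']),
--     'enterprise': (4, ['enterprise', 'general']),
--     'business': (4, ['enterprise', 'general']),
--     'organization': (4, ['enterprise', 'general']),
-- }
-- CATEGORY_MAP = {
--     'knowledge_graph': ['general', 'education', 'healthcare', 'enterprise'],
--     'hdm_specific': ['general', 'education', 'healthcare', 'enterprise'],
--     'algorithms': ['general', 'education', 'healthcare'],
--     'data_integration': ['enterprise', 'healthcare', 'general'],
-- }
--
-- def assign_default_domains(node):
--     concept_name = node['name'].lower()
--     best = None
--     for kw, (pri, doms) in KEYWORD_DOMAINS.items():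
--         if (best is None or pri < best[0]) and kw in concept_name:
--             best = (pri, doms)
--     if best is not None:
--         return list(best[1])
--     category = node.get('category', '').lower()
--     return list(CATEGORY_MAP.get(category, ['general']))
-- ===== Notes on version B (the rewrite author's own statement) =====
-- stated objective: alternative
-- what changed: Replaces A's ordered if/elif chain of any() group checks with a single flat pass over a keyword->(priority,domains) dict keeping a minimum-priority accumulator (no early return, no per-group any), then a category dict lookup with ['general'] default.
-- outside the precondition, e.g. on assign_default_domains({}): A raises KeyError, B raises KeyError
import Mathlib
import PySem

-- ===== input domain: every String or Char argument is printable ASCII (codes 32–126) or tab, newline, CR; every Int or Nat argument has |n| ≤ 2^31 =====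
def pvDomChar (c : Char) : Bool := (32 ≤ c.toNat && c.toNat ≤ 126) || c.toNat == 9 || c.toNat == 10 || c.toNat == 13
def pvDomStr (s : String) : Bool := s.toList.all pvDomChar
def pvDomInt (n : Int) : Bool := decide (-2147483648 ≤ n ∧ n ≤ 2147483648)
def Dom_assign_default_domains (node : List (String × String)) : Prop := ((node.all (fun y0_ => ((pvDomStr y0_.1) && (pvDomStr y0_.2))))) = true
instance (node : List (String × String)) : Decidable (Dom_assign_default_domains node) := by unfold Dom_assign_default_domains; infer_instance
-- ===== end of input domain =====

set_option maxRecDepth 8000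

-- B replaces A's ordered if/elif chain of any() group checks with one flat pass over a
-- keyword->(priority, domains) table keeping a minimum-priority accumulator; same return value.

-- ===== PORT A =====
def assign_default_domains (node : List (String × String)) : List String :=
  let concept_name := PySem.Str.lower (((PySem.Dict.ofList node).get? "name").getD "")
  let category := PySem.Str.lower ((PySem.Dict.ofList node).getD "category" "")
  if (["learn", "education", "student", "curriculum"].any fun term => PySem.Str.isIn term concept_name) then
    ["education", "general"]
  else if (["health", "medical", "clinical", "patient"].any fun term => PySem.Str.isIn term concept_name) then
    ["healthcare", "general"]
  else if (["social", "network", "collaboration", "community"].any fun term => PySem.Str.isIn term concept_name) then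
    ["social", "general"]
  else if (["iot", "sensor", "device", "smart"].any fun term => PySem.Str.isIn term concept_name) then
    ["iot", "general"]
  else if (["enterprise", "business", "organization"].any fun term => PySem.Str.isIn term concept_name) then
    ["enterprise", "general"]
  else if category ∈ ["knowledge_graph", "hdm_specific"] then
    ["general", "education", "healthcare", "enterprise"]
  else if category = "algorithms" then
    ["general", "education", "healthcare"]
  else if category = "data_integration" then
    ["enterprise", "healthcare", "general"]
  else
    ["general"]

-- ===== PORT B =====
-- the KEYWORD_DOMAINS dict of Source B, as its items list (insertion order; keys distinct)
def pvKeywordDomains : List (String × (Int × List String)) :=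
  [ ("learn", (0, ["education", "general"]))
  , ("education", (0, ["education", "general"]))
  , ("student", (0, ["education", "general"]))
  , ("curriculum", (0, ["education", "general"]))
  , ("health", (1, ["healthcare", "general"]))
  , ("medical", (1, ["healthcare", "general"]))
  , ("clinical", (1, ["healthcare", "general"]))
  , ("patient", (1, ["healthcare", "general"]))
  , ("social", (2, ["social", "general"]))
  , ("network", (2, ["social", "general"]))
  , ("collaboration", (2, ["social", "general"]))
  , ("community", (2, ["social", "general"]))
  , ("iot", (3, ["iot", "general"]))
  , ("sensor", (3, ["iot", "general"]))
  , ("device", (3, ["iot", "general"]))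
  , ("smart", (3, ["iot", "general"]))
  , ("enterprise", (4, ["enterprise", "general"]))
  , ("business", (4, ["enterprise", "general"]))
  , ("organization", (4, ["enterprise", "general"])) ]

def pvCategoryMap : PySem.Dict String (List String) :=
  PySem.Dict.ofList
    [ ("knowledge_graph", ["general", "education", "healthcare", "enterprise"])
    , ("hdm_specific", ["general", "education", "healthcare", "enterprise"])
    , ("algorithms", ["general", "education", "healthcare"])
    , ("data_integration", ["enterprise", "healthcare", "general"]) ]

-- loop body of Source B: keep the entry with the smallest priority among matching keywords
def pvStep (concept_name : String) (best : Option (Int × List String))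
    (kp : String × (Int × List String)) : Option (Int × List String) :=
  if ((match best with | none => true | some b => decide (kp.2.1 < b.1))
      && PySem.Str.isIn kp.1 concept_name) then some kp.2 else best

def assign_default_domains_alt (node : List (String × String)) : List String :=
  let concept_name := PySem.Str.lower (((PySem.Dict.ofList node).get? "name").getD "")
  match pvKeywordDomains.foldl (pvStep concept_name) none with
  | some b => b.2
  | none =>
    let category := PySem.Str.lower ((PySem.Dict.ofList node).getD "category" "")
    pvCategoryMap.getD category ["general"]

-- ===== PRECONDITION & SPEC =====
-- Pre_ excludes nodes without a "name" key, on which the Python A raises KeyError.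
def Pre_assign_default_domains (node : List (String × String)) : Prop :=
  "name" ∈ node.map Prod.fst
instance (node : List (String × String)) : Decidable (Pre_assign_default_domains node) := by unfold Pre_assign_default_domains; infer_instance

def pvWitness_assign_default_domains : (List (String × String)) := [("name", "Smart Learning")]

def Spec_assign_default_domains (node : List (String × String)) (out : List String) : Prop := out = assign_default_domains_alt node
instance (node : List (String × String)) (out : List String) : Decidable (Spec_assign_default_domains node out) := by unfold Spec_assign_default_domains; infer_instance

-- ===== CLAIM (what is proved, stated in full; the proofs are below) =====
def Claim_equal_assign_default_domains : Prop := ∀ (node : List (String × String)), Dom_assign_default_domains node → Pre_assign_default_domains node → Spec_assign_default_domains node (assign_default_domains node)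

-- ===== LEMMAS AND PROOFS =====

-- once best is set to priority p not above any remaining priority, the fold leaves it unchanged
theorem fold_stuck (cn : String) (b : Int × List String) :
    ∀ (l : List (String × (Int × List String))), (∀ x ∈ l, b.1 ≤ x.2.1) →
    l.foldl (pvStep cn) (some b) = some b := by
  intro l
  induction l with
  | nil => intro _; rfl
  | cons x xs ih =>
    intro h
    have hx : b.1 ≤ x.2.1 := h x (List.mem_cons_self ..)
    simp only [List.foldl_cons, pvStep]
    rw [if_neg]
    · exact ih fun y hy => h y (List.mem_cons_of_mem _ hy)
    · simp only [Bool.and_eq_true, decide_eq_true_eq]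
      intro ⟨hlt, _⟩; omega

-- a block of keywords sharing one (priority, domains) entry, folded from none
theorem fold_group (cn : String) (p : Int × List String) (kws : List String)
    (rest : List (String × (Int × List String))) (hrest : ∀ x ∈ rest, p.1 ≤ x.2.1) :
    ((kws.map (fun k => (k, p))) ++ rest).foldl (pvStep cn) none =
      (if kws.any (fun k => PySem.Str.isIn k cn) then some p
       else rest.foldl (pvStep cn) none) := by
  induction kws with
  | nil => simp
  | cons k ks ih =>
    simp only [List.map_cons, List.cons_append, List.foldl_cons, List.any_cons]
    by_cases hk : PySem.Str.isIn k cn = true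
    · rw [show pvStep cn none (k, p) = some p by
        simp only [pvStep]; rw [if_pos (by rw [Bool.and_eq_true]; exact ⟨rfl, hk⟩)]]
      rw [List.foldl_append, fold_stuck cn p _ (by
        intro x hx; rcases List.mem_map.mp hx with ⟨a, _, rfl⟩; exact le_refl _),
        fold_stuck cn p rest hrest]
      simp only [hk, Bool.true_or, if_true]
    · simp only [Bool.not_eq_true] at hk
      rw [show pvStep cn none (k, p) = none by
        simp only [pvStep]; rw [if_neg (by rw [Bool.and_eq_true]; rintro ⟨_, h⟩; rw [hk] at h; exact Bool.false_ne_true h)]]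
      rw [ih]; simp only [hk, Bool.false_or]

theorem cat_lookup (cat : String) :
    pvCategoryMap.getD cat ["general"] =
      if cat = "knowledge_graph" ∨ cat = "hdm_specific" then ["general", "education", "healthcare", "enterprise"]
      else if cat = "algorithms" then ["general", "education", "healthcare"]
      else if cat = "data_integration" then ["enterprise", "healthcare", "general"]
      else ["general"] := by
  by_cases c1 : cat = "knowledge_graph"
  · subst c1; decide
  by_cases c2 : cat = "hdm_specific"
  · subst c2; decide
  by_cases c3 : cat = "algorithms"
  · subst c3; decide
  by_cases c4 : cat = "data_integration"
  · subst c4; decide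
  rw [if_neg (by tauto), if_neg c3, if_neg c4]
  have h : pvCategoryMap = PySem.Dict.mk
    [ ("knowledge_graph", ["general", "education", "healthcare", "enterprise"])
    , ("hdm_specific", ["general", "education", "healthcare", "enterprise"])
    , ("algorithms", ["general", "education", "healthcare"])
    , ("data_integration", ["enterprise", "healthcare", "general"]) ] := by decide
  rw [h, PySem.Dict.getD_eq_get?_getD]
  simp only [PySem.Dict.get?_mk_cons, beq_iff_eq]
  rw [if_neg (fun e => c1 e.symm), if_neg (fun e => c2 e.symm),
      if_neg (fun e => c3 e.symm), if_neg (fun e => c4 e.symm)]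
  rfl

-- the flat keyword table is the five blocks in priority order
theorem table_split :
    pvKeywordDomains =
      (["learn", "education", "student", "curriculum"].map (fun k => (k, ((0 : Int), ["education", "general"])))) ++
      ((["health", "medical", "clinical", "patient"].map (fun k => (k, ((1 : Int), ["healthcare", "general"])))) ++
      ((["social", "network", "collaboration", "community"].map (fun k => (k, ((2 : Int), ["social", "general"])))) ++
      ((["iot", "sensor", "device", "smart"].map (fun k => (k, ((3 : Int), ["iot", "general"])))) ++
      ((["enterprise", "business", "organization"].map (fun k => (k, ((4 : Int), ["enterprise", "general"])))) ++ [])))) := rfl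

theorem fold_eval (cn : String) :
    pvKeywordDomains.foldl (pvStep cn) none =
      (if (["learn", "education", "student", "curriculum"].any fun k => PySem.Str.isIn k cn) then some ((0 : Int), ["education", "general"])
       else if (["health", "medical", "clinical", "patient"].any fun k => PySem.Str.isIn k cn) then some ((1 : Int), ["healthcare", "general"])
       else if (["social", "network", "collaboration", "community"].any fun k => PySem.Str.isIn k cn) then some ((2 : Int), ["social", "general"])
       else if (["iot", "sensor", "device", "smart"].any fun k => PySem.Str.isIn k cn) then some ((3 : Int), ["iot", "general"])
       else if (["enterprise", "business", "organization"].any fun k => PySem.Str.isIn k cn) then some ((4 : Int), ["enterprise", "general"])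
       else none) := by
  rw [table_split,
    fold_group cn _ _ _ (by decide),
    fold_group cn _ _ _ (by decide),
    fold_group cn _ _ _ (by decide),
    fold_group cn _ _ _ (by decide),
    fold_group cn _ _ [] (by simp)]
  rfl

-- ===== VERDICT (by name: the statement is the Claim_ definition above) =====
theorem assign_default_domains_spec : Claim_equal_assign_default_domains := by
  intro node _ _
  unfold Spec_assign_default_domains assign_default_domains assign_default_domains_alt
  simp only [fold_eval]
  generalize PySem.Str.lower (((PySem.Dict.ofList node).get? "name").getD "") = cn
  generalize PySem.Str.lower ((PySem.Dict.ofList node).getD "category" "") = cat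
  by_cases h1 : (["learn", "education", "student", "curriculum"].any fun k => PySem.Str.isIn k cn) = true <;>
  by_cases h2 : (["health", "medical", "clinical", "patient"].any fun k => PySem.Str.isIn k cn) = true <;>
  by_cases h3 : (["social", "network", "collaboration", "community"].any fun k => PySem.Str.isIn k cn) = true <;>
  by_cases h4 : (["iot", "sensor", "device", "smart"].any fun k => PySem.Str.isIn k cn) = true <;>
  by_cases h5 : (["enterprise", "business", "organization"].any fun k => PySem.Str.isIn k cn) = true <;>
  simp only [h1, h2, h3, h4, h5, if_true, if_false, Bool.false_eq_true] <;>
  rw [cat_lookup] <;>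
  simp [List.mem_cons]
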